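-- pv_equiv track=rewrite | github.com/sanyuwen/leetcode | uber_oa/oa9.py | solve
-- ===== SOURCE A (Python) =====
-- from typing import List
-- from collections import defaultdict, Counter
--
-- def solve(A: List[int]) -> int:
--     n = len(A)
--     # 2 pointers
--     ans = 0
--     for i in range(n - 1):
--         for j in range(i, n):
--             if all(v >= 2 for v in Counter(A[i:j + 1]).values()):
--                 ans += 1
--     return ans
-- ===== SOURCE B (Python) =====
-- from typing import List
--
-- def solve(A: List[int]) -> int:
--     # Incremental per-start counting: extend the subarray one element at a
--     # time, maintaining a count dict and the number of values seen exactly once.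
--     n = len(A)
--     ans = 0
--     for i in range(n):
--         cnt = {}
--         singles = 0
--         for x in A[i:]:
--             c = cnt.get(x, 0) + 1
--             cnt[x] = c
--             if c == 1:
--                 singles += 1
--             elif c == 2:
--                 singles -= 1
--             if singles == 0:
--                 ans += 1
--     return ans
-- ===== Notes on version B (the rewrite author's own statement) =====
-- stated objective: faster
-- what changed: Instead of rebuilding a Counter of the slice A[i:j+1] and scanning all its values for every pair (i,j), B fixes the start i once and extends the window one element at a time, maintaining the count dict and the number of values seen exactly once incrementally, so each (i,j) costs O(1).
import Mathlib
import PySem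

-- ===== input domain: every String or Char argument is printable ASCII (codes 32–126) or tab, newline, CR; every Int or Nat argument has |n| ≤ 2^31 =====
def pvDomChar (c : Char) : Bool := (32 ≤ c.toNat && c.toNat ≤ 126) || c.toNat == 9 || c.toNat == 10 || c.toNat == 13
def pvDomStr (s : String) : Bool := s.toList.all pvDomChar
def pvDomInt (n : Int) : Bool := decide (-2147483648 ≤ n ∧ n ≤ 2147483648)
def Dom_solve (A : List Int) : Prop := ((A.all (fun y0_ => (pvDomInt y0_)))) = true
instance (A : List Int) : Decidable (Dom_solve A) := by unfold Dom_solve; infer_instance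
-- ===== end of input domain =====

-- B replaces A's per-(i,j) Counter rebuild + full value scan by an incremental count dict
-- with a running number of values seen exactly once (timed measurably faster).


-- ===== PORT A =====
def solve (A : List Int) : Int :=
  let n : Int := A.length
  (PySem.List.pyRange 0 (n - 1) 1).foldl (fun ans i =>
    (PySem.List.pyRange i n 1).foldl (fun ans j =>
      if (PySem.Dict.counter (PySem.List.slice A (some i) (some (j + 1)))).values.all
          (fun v => decide (2 ≤ v)) then ans + 1 else ans) ans) 0

-- ===== PORT B =====
-- one step of B's inner loop: state (ans, cnt, singles), next element x
def bstep (s : Int × PySem.Dict Int Int × Int) (x : Int) : Int × PySem.Dict Int Int × Int :=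
  let c := s.2.1.getD x 0 + 1
  let cnt := s.2.1.insert x c
  let singles := if c = 1 then s.2.2 + 1 else if c = 2 then s.2.2 - 1 else s.2.2
  (if singles = 0 then s.1 + 1 else s.1, cnt, singles)

def solve_alt (A : List Int) : Int :=
  let n : Int := A.length
  (PySem.List.pyRange 0 n 1).foldl (fun ans i =>
    ((PySem.List.slice A (some i) none).foldl bstep (ans, PySem.Dict.empty, 0)).1) 0

-- ===== PRECONDITION & SPEC =====
def Spec_solve (A : List Int) (out : Int) : Prop := out = solve_alt A
instance (A : List Int) (out : Int) : Decidable (Spec_solve A out) := by unfold Spec_solve; infer_instance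

-- ===== CLAIM (what is proved, stated in full; the proofs are below) =====
def Claim_equal_solve : Prop := ∀ (A : List Int), Dom_solve A → Spec_solve A (solve A)

-- ===== LEMMAS AND PROOFS =====

-- A's acceptance test on a subarray p
def ok (p : List Int) : Bool :=
  (PySem.Dict.counter p).values.all (fun v => decide (2 ≤ v))

-- number of values occurring exactly once in p (each such value is hit exactly once by countP)
def nsingles (p : List Int) : Nat := p.countP (fun y => p.count y == 1)

-- the common intermediate form: number of qualifying nonempty prefixes of l
def cnt_ok (l : List Int) : Int :=
  ((List.range l.length).map (fun k => if ok (l.take (k + 1)) then (1 : Int) else 0)).sum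

lemma counter_insert_getD (p : List Int) (x : Int) :
    (PySem.Dict.counter p).insert x ((PySem.Dict.counter p).getD x 0 + 1)
      = PySem.Dict.counter (p ++ [x]) := by
  have h : ∀ (l : List Int),
      l.foldl (fun d x => d.insert x (d.getD x 0 + 1)) PySem.Dict.empty = PySem.Dict.counter l :=
    fun l => PySem.Dict.foldl_insert_getD_add_one_eq_counter l
  calc (PySem.Dict.counter p).insert x ((PySem.Dict.counter p).getD x 0 + 1)
      = ((p.foldl (fun d x => d.insert x (d.getD x 0 + 1)) PySem.Dict.empty).insert x
          ((p.foldl (fun d x => d.insert x (d.getD x 0 + 1)) PySem.Dict.empty).getD x 0 + 1)) := by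
        rw [h]
    _ = (p ++ [x]).foldl (fun d x => d.insert x (d.getD x 0 + 1)) PySem.Dict.empty := by
        rw [List.foldl_append]; rfl
    _ = PySem.Dict.counter (p ++ [x]) := h _

lemma countP_exchange₁ (p : List Int) (x : Int) (f g : Int → Bool)
    (h : ∀ y, y ≠ x → f y = g y) (hf : f x = false) (hg : g x = true) :
    p.countP f + p.count x = p.countP g := by
  induction p with
  | nil => simp
  | cons a t ih =>
    rw [List.countP_cons, List.countP_cons, List.count_cons]
    by_cases hax : a = x
    · subst hax
      rw [hf, hg]
      simp
      omega
    · rw [h a hax, if_neg (show ¬((a == x) = true) by simp [hax])]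
      omega

lemma countP_exchange₂ (p : List Int) (x : Int) (f g : Int → Bool)
    (h : ∀ y, y ≠ x → f y = g y) (hf : f x = false) (hg : g x = false) :
    p.countP f = p.countP g := by
  induction p with
  | nil => simp
  | cons a t ih =>
    rw [List.countP_cons, List.countP_cons]
    by_cases hax : a = x
    · subst hax
      rw [hf, hg]
      omega
    · rw [h a hax]
      omega

lemma count_append_singleton (p : List Int) (x y : Int) :
    (p ++ [x]).count y = p.count y + (if y = x then 1 else 0) := by
  rw [List.count_append, List.count_cons, List.count_nil]
  rcases eq_or_ne y x with rfl | hne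
  · simp
  · simp [hne, hne.symm]

lemma counter_insert_count (p : List Int) (x : Int) :
    (PySem.Dict.counter p).insert x ((p.count x : Int) + 1) = PySem.Dict.counter (p ++ [x]) := by
  rw [← PySem.Dict.getD_counter]
  exact counter_insert_getD p x

lemma ns0 (p : List Int) (x : Int) (h : p.count x = 0) :
    nsingles (p ++ [x]) = nsingles p + 1 := by
  unfold nsingles
  rw [List.countP_append]
  have hx : x ∉ p := List.count_eq_zero.mp h
  have h1 : p.countP (fun y => (p ++ [x]).count y == 1) = p.countP (fun y => p.count y == 1) := by
    apply List.countP_congr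
    intro y hy
    have hyx : y ≠ x := fun e => hx (e ▸ hy)
    rw [count_append_singleton, if_neg hyx, Nat.add_zero]
  have h2 : List.countP (fun y => (p ++ [x]).count y == 1) [x] = 1 := by
    simp [List.countP_cons, count_append_singleton, h]
  omega

lemma ns1 (p : List Int) (x : Int) (h : p.count x = 1) :
    (nsingles (p ++ [x]) : Int) = (nsingles p : Int) - 1 := by
  unfold nsingles
  rw [List.countP_append]
  have hfx : ((p ++ [x]).count x == 1) = false := by
    rw [count_append_singleton]; simp [h]
  have hgx : (p.count x == 1) = true := by simp [h]
  have hex := countP_exchange₁ p x (fun y => (p ++ [x]).count y == 1) (fun y => p.count y == 1)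
    (by intro y hy
        show ((p ++ [x]).count y == 1) = (p.count y == 1)
        rw [count_append_singleton, if_neg hy, Nat.add_zero]) hfx hgx
  have h2 : List.countP (fun y => (p ++ [x]).count y == 1) [x] = 0 := by
    simp [List.countP_cons]
    omega
  omega

lemma ns2 (p : List Int) (x : Int) (h : 2 ≤ p.count x) :
    nsingles (p ++ [x]) = nsingles p := by
  unfold nsingles
  rw [List.countP_append]
  have hfx : ((p ++ [x]).count x == 1) = false := by
    rw [count_append_singleton]; simp; omega
  have hgx : (p.count x == 1) = false := by simp; omega
  have hex := countP_exchange₂ p x (fun y => (p ++ [x]).count y == 1) (fun y => p.count y == 1)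
    (by intro y hy
        show ((p ++ [x]).count y == 1) = (p.count y == 1)
        rw [count_append_singleton, if_neg hy, Nat.add_zero]) hfx hgx
  have h2 : List.countP (fun y => (p ++ [x]).count y == 1) [x] = 0 := by
    simp [List.countP_cons]
    omega
  omega

lemma ok_iff (p : List Int) : ok p = true ↔ nsingles p = 0 := by
  have hval : (PySem.Dict.counter p).values
      = (PySem.Set.ofList p).map (fun k => (p.count k : Int)) := by
    simp [PySem.Dict.values, PySem.Dict.items_counter, Function.comp]
  unfold ok nsingles
  rw [List.countP_eq_zero, hval, List.all_map, List.all_eq_true]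
  constructor
  · intro hall y hy
    have h2 := hall y ((PySem.Set.mem_ofList _ _).mpr hy)
    simp at h2 ⊢
    omega
  · intro hnone k hk
    have hkp : k ∈ p := (PySem.Set.mem_ofList _ _).mp hk
    have h1 : p.count k ≠ 0 := fun hc => (List.count_eq_zero.mp hc) hkp
    have h2 := hnone k hkp
    simp at h2 ⊢
    omega

lemma inner_B (l : List Int) : ∀ (p : List Int) (ans : Int),
    (l.foldl bstep (ans, PySem.Dict.counter p, (nsingles p : Int))).1
      = ans + ((List.range l.length).map
          (fun k => if ok (p ++ l.take (k + 1)) then (1 : Int) else 0)).sum := by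
  induction l with
  | nil => intro p ans; simp
  | cons x t ih =>
    intro p ans
    have hsing : (if ((p.count x : Int) + 1) = 1 then (nsingles p : Int) + 1
        else if ((p.count x : Int) + 1) = 2 then (nsingles p : Int) - 1 else (nsingles p : Int))
        = (nsingles (p ++ [x]) : Int) := by
      by_cases h0 : p.count x = 0
      · rw [if_pos (by omega), ns0 p x h0]; push_cast; ring
      · by_cases h1 : p.count x = 1
        · rw [if_neg (by omega), if_pos (by omega), ns1 p x h1]
        · rw [if_neg (by omega), if_neg (by omega), ns2 p x (by omega)]
    have hstep : bstep (ans, PySem.Dict.counter p, (nsingles p : Int)) x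
        = ((if (nsingles (p ++ [x]) : Int) = 0 then ans + 1 else ans),
           PySem.Dict.counter (p ++ [x]), (nsingles (p ++ [x]) : Int)) := by
      unfold bstep
      simp only [PySem.Dict.getD_counter, counter_insert_count]
      rw [hsing]
    rw [List.foldl_cons, hstep, ih (p ++ [x])]
    rw [List.length_cons, List.range_succ_eq_map]
    simp only [List.map_cons, List.map_map, List.sum_cons, Function.comp_def]
    have htake : ((List.range t.length).map
          (fun k => if ok (p ++ (x :: t).take (Nat.succ k + 1)) then (1 : Int) else 0))
        = ((List.range t.length).map
          (fun k => if ok ((p ++ [x]) ++ t.take (k + 1)) then (1 : Int) else 0)) := by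
      apply List.map_congr_left
      intro k _
      have hh : p ++ (x :: t).take (Nat.succ k + 1) = (p ++ [x]) ++ t.take (k + 1) := by
        simp [List.take_succ_cons]
      rw [hh]
    rw [htake]
    have hzero : (x :: t).take (0 + 1) = [x] := by simp
    rw [hzero]
    by_cases hns : nsingles (p ++ [x]) = 0
    · have hok : ok (p ++ [x]) = true := (ok_iff _).mpr hns
      simp [hok, hns]
      try ring
    · have hok : ¬ ok (p ++ [x]) = true := fun hh => hns ((ok_iff _).mp hh)
      simp [hok, hns, Int.natCast_eq_zero]
      try ring

lemma inner_B_nil (l : List Int) (ans : Int) :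
    (l.foldl bstep (ans, PySem.Dict.empty, 0)).1 = ans + cnt_ok l := by
  have h := inner_B l [] ans
  simpa [cnt_ok, PySem.Dict.counter, nsingles] using h

lemma foldl_if_one (l : List Nat) (c : Nat → Bool) (a : Int) :
    l.foldl (fun acc k => if c k then acc + 1 else acc) a
      = a + (l.map (fun k => if c k then (1 : Int) else 0)).sum := by
  induction l generalizing a with
  | nil => simp
  | cons h t ih =>
    rw [List.foldl_cons, List.map_cons, List.sum_cons, ih]
    cases c h <;> simp <;> ring

lemma inner_A (A : List Int) (i : Int) (hi : 0 ≤ i) (hi2 : i ≤ (A.length : Int)) (ans : Int) :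
    (PySem.List.pyRange i A.length 1).foldl (fun ans j =>
      if (PySem.Dict.counter (PySem.List.slice A (some i) (some (j + 1)))).values.all
          (fun v => decide (2 ≤ v)) then ans + 1 else ans) ans
      = ans + cnt_ok (A.drop i.toNat) := by
  show (PySem.List.pyRange i A.length 1).foldl (fun ans j =>
      if ok (PySem.List.slice A (some i) (some (j + 1))) then ans + 1 else ans) ans = _
  rw [PySem.List.pyRange_one, List.foldl_map, foldl_if_one]
  unfold cnt_ok
  have hlen : (A.drop i.toNat).length = ((A.length : Int) - i).toNat := by
    simp [List.length_drop]
    omega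
  rw [hlen]
  congr 1
  congr 1
  apply List.map_congr_left
  intro k hk
  have hb : (0 : Int) ≤ i + (k : Int) + 1 := by omega
  have hs : PySem.List.slice A (some i) (some (i + (k : Int) + 1))
      = (A.drop i.toNat).take (k + 1) := by
    rw [PySem.List.slice_toNat A hi hb]
    congr 1
    omega
  rw [hs]

lemma ok_singleton (a : Int) : ok [a] = false := by
  simp [ok, PySem.Dict.values, PySem.Dict.items_counter, PySem.Set.ofList, PySem.Set.add,
    PySem.Set.contains, List.count]

-- ===== VERDICT (by name: the statement is the Claim_ definition above) =====
theorem solve_spec : Claim_equal_solve := by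
  intro A _
  unfold Spec_solve solve solve_alt
  simp only []
  by_cases h0 : A.length = 0
  · rw [h0]
    rw [PySem.List.pyRange_one_eq_nil (by omega), PySem.List.pyRange_one_eq_nil (by omega)]
    rfl
  · have hn1 : (1 : Int) ≤ (A.length : Int) := by exact_mod_cast Nat.one_le_iff_ne_zero.mpr h0
    rw [PySem.List.pyRange_one_append 0 ((A.length : Int) - 1) (A.length) (by omega) (by omega)]
    rw [List.foldl_append]
    have hsing : PySem.List.pyRange ((A.length : Int) - 1) (A.length) 1
        = [(A.length : Int) - 1] := by
      have h := PySem.List.pyRange_one_singleton (a := (A.length : Int) - 1)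
      simpa using h
    rw [hsing, List.foldl_cons, List.foldl_nil]
    have hslast : PySem.List.slice A (some ((A.length : Int) - 1)) none
        = A.drop ((A.length : Int) - 1).toNat := PySem.List.slice_from _ (by omega)
    rw [hslast, inner_B_nil]
    have hlast : ∃ a, A.drop ((A.length : Int) - 1).toNat = [a] := by
      apply List.length_eq_one_iff.mp
      simp [List.length_drop]
      omega
    obtain ⟨a, ha⟩ := hlast
    have hz : cnt_ok (A.drop ((A.length : Int) - 1).toNat) = 0 := by
      rw [ha]
      simp [cnt_ok, ok_singleton]
    rw [hz, add_zero]
    apply PySem.List.foldl_congr_mem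
    intro acc i hi
    rw [PySem.List.mem_pyRange_one] at hi
    rw [PySem.List.slice_from _ hi.1, inner_B_nil, inner_A A i hi.1 (by omega)]
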